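-- pv_equiv track=rewrite | github.com/wangyu16/nyml | parsers/python/nyml_parser/parser_v2.py | _collect_multiline
-- ===== SOURCE A (Python) =====
-- from typing import Any, List, Optional, Union
--
-- def _leading_spaces(s: str) -> int:
--     """Count leading spaces in a string."""
--     return len(s) - len(s.lstrip(' '))
--
-- def _collect_multiline(lines: List[str], start_idx: int, base_indent: int) -> tuple[str, int]:
--     """
--     Collect multiline string content starting from start_idx + 1.
--
--     Returns (content, next_index) where next_index is the first line
--     not part of the multiline block.
--     """
--     raw_lines: List[str] = []
--     i = start_idx + 1
--
--     while i < len(lines):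
--         line = lines[i]
--         indent = _leading_spaces(line)
--
--         # Empty lines are included in multiline content
--         if line.strip() == '':
--             raw_lines.append('')
--             i += 1
--             continue
--
--         # Line with less or equal indent ends the block
--         if indent <= base_indent:
--             break
--
--         raw_lines.append(line)
--         i += 1
--
--     # Dedent: find minimum indent among non-blank lines
--     nonblank = [r for r in raw_lines if r.strip() != '']
--     if nonblank:
--         min_indent = min(_leading_spaces(r) for r in nonblank)
--     else:
--         min_indent = 0
--
--     # Apply dedent
--     pieces: List[str] = []
--     for r in raw_lines:
--         if r.strip() == '':
--             pieces.append('')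
--         else:
--             pieces.append(r[min_indent:])
--
--     # Collapse multiple trailing blank lines
--     while len(pieces) >= 2 and pieces[-1] == '' and pieces[-2] == '':
--         pieces.pop()
--
--     # Build content with trailing newline
--     if pieces and pieces[-1] == '':
--         content = '\n'.join(pieces)
--     else:
--         content = '\n'.join(pieces) + '\n' if pieces else ''
--
--     return content, i
-- ===== SOURCE B (Python) =====
-- def _collect_multiline(lines, start_idx, base_indent):
--     # Different representation: each block line is split ONCE into
--     # (indent, tail-after-leading-spaces); blanks are stored as None.
--     # Dedent becomes re-padding with spaces (' '*(k-mi) + tail) instead of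
--     # slicing, and the content string is assembled back-to-front, so trailing
--     # blank lines disappear with no trimming/collapsing pass.
--     n = len(lines)
--     parsed = []          # None for a blank line, else (indent, tail)
--     mi = None            # running minimum indent over non-blank lines
--     j = start_idx + 1
--     while j < n:
--         line = lines[j]
--         tail = line.lstrip(' ')
--         if tail.strip() == '':
--             parsed.append(None)
--         else:
--             k = len(line) - len(tail)
--             if k <= base_indent:
--                 break
--             parsed.append((k, tail))
--             if mi is None or k < mi:
--                 mi = k
--         j += 1
--     content = None       # None while only trailing blank lines have been seen
--     for p in reversed(parsed):
--         piece = '' if p is None else ' ' * (p[0] - mi) + p[1]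
--         if content is not None:
--             content = piece + '\n' + content
--         elif p is not None:
--             content = piece + '\n'
--     return (content if content is not None else '', j)
-- ===== Notes on version B (the rewrite author's own statement) =====
-- stated objective: alternative
-- what changed: B changes the data representation and assembly: each block line is split once into an (indent, tail) pair (blanks stored as None) with the minimum indent tracked inline, dedent is re-padding the tail with ' '*(k-mi) instead of slicing the raw line, and the content string is built back-to-front so trailing blank lines vanish without A's filter+min scan, dedent pass, pop-collapse loop and trailing-newline branch.
import Mathlib
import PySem

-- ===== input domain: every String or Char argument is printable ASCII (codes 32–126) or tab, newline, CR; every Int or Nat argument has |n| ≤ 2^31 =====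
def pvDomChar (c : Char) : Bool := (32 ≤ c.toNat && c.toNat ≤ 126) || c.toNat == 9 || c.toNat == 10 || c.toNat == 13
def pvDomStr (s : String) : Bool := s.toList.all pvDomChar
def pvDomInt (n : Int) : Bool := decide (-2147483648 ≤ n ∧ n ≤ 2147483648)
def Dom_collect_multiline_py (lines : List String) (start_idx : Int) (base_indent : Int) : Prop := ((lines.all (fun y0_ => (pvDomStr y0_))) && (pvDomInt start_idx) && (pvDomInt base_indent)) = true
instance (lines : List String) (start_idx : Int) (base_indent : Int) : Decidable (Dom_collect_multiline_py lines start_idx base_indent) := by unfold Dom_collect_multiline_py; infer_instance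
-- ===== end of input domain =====

-- B stores each block line once as an (indent, tail) pair (blanks as None), tracks the minimum
-- indent inline, re-pads instead of slicing, and assembles the content back-to-front so trailing
-- blanks vanish without A's filter+min scan, dedent pass, collapse loop and final branch
-- (objective: alternative).

-- ===== PORT A =====
-- helper _leading_spaces: len(s) - len(s.lstrip(' ')); lstrip(' ') (strip SPACES only) has no
-- PySem primitive, ported by hand as dropWhile (· == ' '), which is exact for lstrip(' ').
def leading_spaces_py (s : String) : Int :=
  (s.toList.length : Int) - ((s.toList.dropWhile (fun c => c == ' ')).length : Int)

-- the while loop, with fuel = the loop bound len(lines) - i (structural recursion on the fuel)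
def collectLoopA (lines : List String) (base_indent : Int) : Nat → Int → List String → List String × Int
  | 0, i, raw => (raw, i)
  | fuel + 1, i, raw =>
    if i < (lines.length : Int) then
      match PySem.List.pyGet? lines i with
      | none => (raw, i)  -- Python raises IndexError here; excluded by Pre_
      | some line =>
        if PySem.Str.strip line = "" then
          collectLoopA lines base_indent fuel (i + 1) (raw ++ [""])
        else if leading_spaces_py line ≤ base_indent then (raw, i)
        else collectLoopA lines base_indent fuel (i + 1) (raw ++ [line])
    else (raw, i)

-- the pop-loop, with fuel = len(pieces) (each pop shortens the list by one)
def collapseGoA : Nat → List String → List String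
  | 0, pieces => pieces
  | fuel + 1, pieces =>
    if 2 ≤ pieces.length ∧ PySem.List.pyGet? pieces (-1) = some "" ∧ PySem.List.pyGet? pieces (-2) = some "" then
      collapseGoA fuel pieces.dropLast
    else pieces

def collapseTrailingA (pieces : List String) : List String := collapseGoA pieces.length pieces

def collect_multiline_py (lines : List String) (start_idx : Int) (base_indent : Int) : String × Int :=
  let r := collectLoopA lines base_indent ((lines.length : Int) - (start_idx + 1)).toNat (start_idx + 1) []
  let raw_lines := r.1
  let i := r.2
  let nonblank := raw_lines.filter (fun rr => !(PySem.Str.strip rr == ""))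
  let min_indent : Int :=
    if nonblank.isEmpty then 0
    else (PySem.List.min? (nonblank.map leading_spaces_py) (fun x => x)).getD 0
  let pieces := raw_lines.map (fun rr =>
    if PySem.Str.strip rr = "" then "" else PySem.Str.slice rr (some min_indent) none)
  let pieces := collapseTrailingA pieces
  let content :=
    if pieces ≠ [] ∧ PySem.List.pyGet? pieces (-1) = some "" then PySem.Str.join "\n" pieces
    else if pieces ≠ [] then PySem.Str.join "\n" pieces ++ "\n"
    else ""
  (content, i)

-- ===== PORT B =====
-- the gather loop: each accepted line is stored as none (blank) or some (indent, tail);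
-- line.lstrip(' ') is again ported by hand as dropWhile (· == ' ')
def parseLoopB (lines : List String) (base_indent : Int) :
    Nat → Int → List (Option (Int × String)) → Option Int →
      List (Option (Int × String)) × Option Int × Int
  | 0, j, acc, mi => (acc, mi, j)
  | fuel + 1, j, acc, mi =>
    if j < (lines.length : Int) then
      match PySem.List.pyGet? lines j with
      | none => (acc, mi, j)  -- Python raises IndexError here; excluded by Pre_
      | some line =>
        let tail := String.ofList (line.toList.dropWhile (fun c => c == ' '))
        if PySem.Str.strip tail = "" then
          parseLoopB lines base_indent fuel (j + 1) (acc ++ [none]) mi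
        else
          let k : Int := PySem.Str.len line - PySem.Str.len tail
          if k ≤ base_indent then (acc, mi, j)
          else
            parseLoopB lines base_indent fuel (j + 1) (acc ++ [some (k, tail)])
              (match mi with
               | none => some k
               | some m => if k < m then some k else some m)
    else (acc, mi, j)

-- piece = '' if p is None else ' ' * (p[0] - mi) + p[1]   (mi is only read when a non-blank
-- entry exists, so the .getD 0 default passed in by the caller is never observable)
def pieceB (mi : Int) (p : Option (Int × String)) : String :=
  match p with
  | none => ""
  | some (k, t) => String.ofList (List.replicate (k - mi).toNat ' ') ++ t

-- one step of the back-to-front assembly loop (content is None while only trailing blanks seen)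
def buildStep (mi : Int) (acc : Option String) (p : Option (Int × String)) : Option String :=
  match acc with
  | some c => some (pieceB mi p ++ "\n" ++ c)
  | none => match p with
    | some _ => some (pieceB mi p ++ "\n")
    | none => none

def collect_multiline_py_alt (lines : List String) (start_idx : Int) (base_indent : Int) : String × Int :=
  let r := parseLoopB lines base_indent ((lines.length : Int) - (start_idx + 1)).toNat (start_idx + 1) [] none
  let mi := (r.2.1).getD 0
  let content := r.1.reverse.foldl (buildStep mi) none
  (content.getD "", r.2.2)

-- ===== PRECONDITION & SPEC =====
-- Pre_ excludes exactly the inputs where Python raises IndexError: the loop is entered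
-- (start_idx + 1 < len(lines)) with a first index below -len(lines), so lines[i] raises.
def Pre_collect_multiline_py (lines : List String) (start_idx : Int) (base_indent : Int) : Prop :=
  ¬ (start_idx + 1 < (lines.length : Int) ∧ start_idx + 1 < -(lines.length : Int))
instance (lines : List String) (start_idx : Int) (base_indent : Int) : Decidable (Pre_collect_multiline_py lines start_idx base_indent) := by unfold Pre_collect_multiline_py; infer_instance

def pvWitness_collect_multiline_py : List String × Int × Int := (["key: |", "  a", "   b", "", "  c"], 0, 0)

def Spec_collect_multiline_py (lines : List String) (start_idx : Int) (base_indent : Int) (out : String × Int) : Prop := out = collect_multiline_py_alt lines start_idx base_indent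
instance (lines : List String) (start_idx : Int) (base_indent : Int) (out : String × Int) : Decidable (Spec_collect_multiline_py lines start_idx base_indent out) := by unfold Spec_collect_multiline_py; infer_instance

-- ===== CLAIM (what is proved, stated in full; the proofs are below) =====
def Claim_equal_collect_multiline_py : Prop := ∀ (lines : List String) (start_idx : Int) (base_indent : Int), Dom_collect_multiline_py lines start_idx base_indent → Pre_collect_multiline_py lines start_idx base_indent → Spec_collect_multiline_py lines start_idx base_indent (collect_multiline_py lines start_idx base_indent)

-- ===== LEMMAS AND PROOFS =====

-- `fMin acc` is B's running minimum: min? of the leading-space counts of the non-blank entries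
def fMin (l : List String) : Option Int :=
  PySem.List.min? ((l.filter (fun rr => !(PySem.Str.strip rr == ""))).map leading_spaces_py) (fun x => x)

-- `encodeLn r` is the parsed entry B stores for the raw line r that A stores
def encodeLn (r : String) : Option (Int × String) :=
  if PySem.Str.strip r = "" then none
  else some (leading_spaces_py r, String.ofList (r.toList.dropWhile (fun c => c == ' ')))

-- `dropTrail` removes trailing "" entries, recursing from the FRONT (matches B's backward build)
def dropTrail : List String → List String
  | [] => []
  | x :: xs =>
    match dropTrail xs with
    | [] => if x = "" then [] else [x]
    | l => x :: l

-- `trimTrailingB` removes trailing "" entries from the BACK (matches A's collapse loop shape)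
def trimGoB : Nat → List String → List String
  | 0, l => l
  | fuel + 1, l =>
    if l ≠ [] ∧ PySem.List.pyGet? l (-1) = some "" then trimGoB fuel l.dropLast else l

def trimTrailingB (l : List String) : List String := trimGoB l.length l

theorem min?_id_append (xs : List Int) (k : Int) :
    PySem.List.min? (xs ++ [k]) (fun x => x) =
      (match PySem.List.min? xs (fun x => x) with
       | none => some k
       | some m => if k < m then some k else some m) := by
  unfold PySem.List.min?
  rw [List.foldl_append]
  generalize List.foldl _ none xs = a
  cases a <;> rfl

theorem fMin_append_blank (l : List String) (x : String) (h : PySem.Str.strip x = "") :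
    fMin (l ++ [x]) = fMin l := by
  simp [fMin, List.filter_append, h]

theorem fMin_append_nonblank (l : List String) (x : String) (h : ¬ PySem.Str.strip x = "") :
    fMin (l ++ [x]) =
      (match fMin l with
       | none => some (leading_spaces_py x)
       | some m => if leading_spaces_py x < m then some (leading_spaces_py x) else some m) := by
  simp [fMin, List.filter_append, h, min?_id_append]

theorem strip_empty : PySem.Str.strip "" = "" := rfl

-- the blank test B performs on the tail equals the blank test A performs on the line
theorem strip_tail (s : String) :
    PySem.Str.strip (String.ofList (s.toList.dropWhile (fun c => c == ' '))) = PySem.Str.strip s := by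
  apply String.ext
  rw [PySem.Str.toList_strip, PySem.Str.toList_strip, String.toList_ofList]
  have : PySem.Chars.lstrip (s.toList.dropWhile (fun c => c == ' ')) = PySem.Chars.lstrip s.toList := by
    unfold PySem.Chars.lstrip
    induction s.toList with
    | nil => rfl
    | cons c cs ih =>
      by_cases hc : c = ' '
      · subst hc
        simpa using ih
      · have hc' : (c == ' ') = false := by simpa using hc
        simp [List.dropWhile_cons, hc']
  unfold PySem.Chars.strip
  rw [this]

-- B's loop carries exactly (A's raw lines encoded, their running minimum, the same index)
theorem encode_empty : encodeLn "" = none := by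
  simp [encodeLn, strip_empty]

theorem loop_rel (lines : List String) (base : Int) (fuel : Nat) (i : Int) (acc : List String) :
    parseLoopB lines base fuel i (acc.map encodeLn) (fMin acc) =
      ((collectLoopA lines base fuel i acc).1.map encodeLn,
        fMin (collectLoopA lines base fuel i acc).1,
        (collectLoopA lines base fuel i acc).2) := by
  fun_induction collectLoopA lines base fuel i acc with
  | case1 i acc =>
    rw [parseLoopB]
  | case2 fuel i acc h hget =>
    rw [parseLoopB]
    simp [h, hget]
  | case3 fuel i acc h line hget hblank ih =>
    rw [parseLoopB]
    rw [fMin_append_blank acc "" strip_empty] at ih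
    simp only [List.map_append, List.map_cons, List.map_nil, encode_empty] at ih
    simp [h, hget, strip_tail, hblank, ih]
  | case4 fuel i acc h line hget hblank hind =>
    rw [parseLoopB]
    simp only [h, if_true, hget, strip_tail]
    simp only [hblank, if_false, PySem.Str.len_eq, String.toList_ofList]
    rw [show ((line.toList.length : Int) - ((line.toList.dropWhile (fun c => c == ' ')).length : Int)) = leading_spaces_py line from rfl]
    simp [hind]
  | case5 fuel i acc h line hget hblank hind ih =>
    rw [parseLoopB]
    rw [fMin_append_nonblank acc line hblank] at ih
    have henc : encodeLn line =
        some (leading_spaces_py line, String.ofList (line.toList.dropWhile (fun c => c == ' '))) := by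
      simp [encodeLn, hblank]
    simp only [List.map_append, List.map_cons, List.map_nil, henc] at ih
    simp only [h, if_true, hget, strip_tail]
    simp only [hblank, if_false, PySem.Str.len_eq, String.toList_ofList]
    rw [show ((line.toList.length : Int) - ((line.toList.dropWhile (fun c => c == ' ')).length : Int)) = leading_spaces_py line from rfl]
    rw [if_neg hind]
    exact ih
  | case6 fuel i acc h =>
    rw [parseLoopB]
    simp [h]

theorem loopA_inv (lines : List String) (base : Int) (fuel : Nat) (i : Int) (acc : List String)
    (hacc : ∀ r ∈ acc, r = "" ∨ ¬ PySem.Str.strip r = "") :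
    ∀ r ∈ (collectLoopA lines base fuel i acc).1, r = "" ∨ ¬ PySem.Str.strip r = "" := by
  fun_induction collectLoopA lines base fuel i acc with
  | case1 i acc => exact hacc
  | case2 fuel i acc h hget => exact hacc
  | case3 fuel i acc h line hget hblank ih =>
    refine ih ?_
    intro r hr
    rcases List.mem_append.1 hr with hr | hr
    · exact hacc r hr
    · simp at hr; subst hr; exact Or.inl rfl
  | case4 fuel i acc h line hget hblank hind => exact hacc
  | case5 fuel i acc h line hget hblank hind ih =>
    refine ih ?_
    intro r hr
    rcases List.mem_append.1 hr with hr | hr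
    · exact hacc r hr
    · simp at hr; subst hr; exact Or.inr hblank
  | case6 fuel i acc h => exact hacc

theorem leading_nonneg (s : String) : 0 ≤ leading_spaces_py s := by
  have := List.length_dropWhile_le (p := fun c => c == ' ') (l := s.toList)
  unfold leading_spaces_py; omega

theorem strip_of_dropWhile_nil (s : String)
    (h : s.toList.dropWhile (fun c => c == ' ') = []) : PySem.Str.strip s = "" := by
  have hall : ∀ c ∈ s.toList, c = ' ' := by
    intro c hc
    have := (List.dropWhile_eq_nil_iff).1 h c hc
    simpa using this
  have hl : PySem.Chars.lstrip s.toList = [] := by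
    unfold PySem.Chars.lstrip
    exact (List.dropWhile_eq_nil_iff).2 (fun c hc => by rw [hall c hc]; decide)
  apply String.ext
  rw [PySem.Str.toList_strip]
  unfold PySem.Chars.strip
  rw [hl]
  rfl

-- decomposition: a line is its leading spaces followed by its tail
theorem line_decomp (s : String) :
    s.toList = List.replicate (leading_spaces_py s).toNat ' ' ++
      s.toList.dropWhile (fun c => c == ' ') := by
  have htk : s.toList.takeWhile (fun c => c == ' ') =
      List.replicate (s.toList.takeWhile (fun c => c == ' ')).length ' ' := by
    rw [List.eq_replicate_iff]
    exact ⟨rfl, fun b hb => by simpa using List.mem_takeWhile_imp hb⟩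
  have hlen : (s.toList.takeWhile (fun c => c == ' ')).length = (leading_spaces_py s).toNat := by
    have h1 : (s.toList.takeWhile (fun c => c == ' ')).length +
        (s.toList.dropWhile (fun c => c == ' ')).length = s.toList.length := by
      rw [← List.length_append, List.takeWhile_append_dropWhile]
    unfold leading_spaces_py; omega
  conv_lhs => rw [← List.takeWhile_append_dropWhile (p := fun c => c == ' ') (l := s.toList)]
  rw [htk, hlen]

-- B's re-padded piece equals A's dedented slice, for a non-blank line and 0 ≤ mi ≤ its indent
theorem piece_eq_slice (r : String) (mi : Int) (h0 : 0 ≤ mi) (hle : mi ≤ leading_spaces_py r) :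
    String.ofList (List.replicate (leading_spaces_py r - mi).toNat ' ') ++
      String.ofList (r.toList.dropWhile (fun c => c == ' '))
    = PySem.Str.slice r (some mi) none := by
  apply String.ext
  rw [PySem.Str.toList_slice, PySem.Chars.slice_eq_listSlice, PySem.List.slice_from _ h0]
  conv_rhs => rw [line_decomp r]
  have hk0 := leading_nonneg r
  rw [List.drop_append_of_le_length (by simp; omega)]
  rw [List.drop_replicate]
  have : (leading_spaces_py r).toNat - mi.toNat = (leading_spaces_py r - mi).toNat := by omega
  simp [this]

theorem pieceB_ne_empty (mi k : Int) (t : String) (ht : t ≠ "") :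
    pieceB mi (some (k, t)) ≠ "" := by
  intro hh
  have := congrArg String.toList hh
  simp [pieceB] at this
  exact ht this.2

theorem pyGet?_concat_neg_one {α : Type} (xs : List α) (x : α) :
    PySem.List.pyGet? (xs ++ [x]) (-1) = some x := by
  simp only [PySem.List.pyGet?, PySem.List.pyIdx?, List.length_append, List.length_cons,
    List.length_nil]
  norm_num

theorem pyGet?_concat_neg_two {α : Type} (ys : List α) (y x : α) :
    PySem.List.pyGet? (ys ++ [y, x]) (-2) = some y := by
  have hlen : (ys ++ [y, x]).length = ys.length + 2 := by simp
  simp only [PySem.List.pyGet?, hlen, PySem.List.pyIdx?]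
  rw [if_neg (by omega : ¬ (0 : Int) ≤ -2),
    if_pos (show -(((ys.length + 2 : Nat)) : Int) ≤ -2 by push_cast; omega)]
  rw [show ys.length + 2 - Int.toNat (-(-2)) = ys.length from by omega]
  simp

theorem join_singleton_str (x : String) : PySem.Str.join "\n" [x] = x := by
  apply String.ext
  simp [PySem.Str.toList_join, PySem.Chars.join_singleton]

theorem join_cons_str (x : String) (l : List String) (h : l ≠ []) :
    PySem.Str.join "\n" (x :: l) = x ++ "\n" ++ PySem.Str.join "\n" l := by
  rcases l with _ | ⟨b, t⟩
  · exact absurd rfl h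
  · apply String.ext
    simp [PySem.Str.toList_join, PySem.Chars.join_cons_cons]

theorem chars_join_concat_nil (sep : List Char) (l : List (List Char)) (h : l ≠ []) :
    PySem.Chars.join sep (l ++ [[]]) = PySem.Chars.join sep l ++ sep := by
  induction l with
  | nil => exact absurd rfl h
  | cons p t ih =>
    cases t with
    | nil => simp [PySem.Chars.join_cons_cons, PySem.Chars.join_singleton]
    | cons q r =>
      have h2 := ih (by simp)
      simp only [List.cons_append] at h2 ⊢
      rw [PySem.Chars.join_cons_cons, h2, PySem.Chars.join_cons_cons]
      simp [List.append_assoc]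

theorem join_concat_empty (xs : List String) (h : xs ≠ []) :
    PySem.Str.join "\n" (xs ++ [""]) = PySem.Str.join "\n" xs ++ "\n" := by
  apply String.ext
  have h' : xs.map String.toList ≠ [] := by simpa using h
  simp [PySem.Str.toList_join, chars_join_concat_nil _ _ h']

theorem trim_nil : trimTrailingB [] = [] := rfl

theorem trim_concat_ne (xs : List String) (x : String) (h : x ≠ "") :
    trimTrailingB (xs ++ [x]) = xs ++ [x] := by
  unfold trimTrailingB
  rw [show (xs ++ [x]).length = xs.length + 1 by simp, trimGoB]
  simp [h]

theorem trim_concat_empty (xs : List String) :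
    trimTrailingB (xs ++ [""]) = trimTrailingB xs := by
  unfold trimTrailingB
  rw [show (xs ++ [""]).length = xs.length + 1 by simp, trimGoB]
  simp

theorem dropTrail_concat_empty (xs : List String) :
    dropTrail (xs ++ [""]) = dropTrail xs := by
  induction xs with
  | nil => rfl
  | cons y ys ih =>
    rw [List.cons_append, dropTrail, ih, dropTrail]

theorem dropTrail_concat_ne (xs : List String) (x : String) (h : x ≠ "") :
    dropTrail (xs ++ [x]) = xs ++ [x] := by
  induction xs with
  | nil => simp [dropTrail, h]
  | cons y ys ih =>
    rw [List.cons_append, dropTrail, ih]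
    have : ys ++ [x] ≠ [] := by simp
    rcases hE : ys ++ [x] with _ | ⟨a, b⟩
    · exact absurd hE this
    · rfl

theorem trim_eq_dropTrail (M : List String) : trimTrailingB M = dropTrail M := by
  induction M using List.reverseRecOn with
  | nil => rfl
  | append_singleton xs x ih =>
    by_cases hx : x = ""
    · subst hx; rw [trim_concat_empty, dropTrail_concat_empty, ih]
    · rw [trim_concat_ne xs x hx, dropTrail_concat_ne xs x hx]

-- B's back-to-front assembly computes: drop the trailing blanks, join, append one '\n'
theorem foldB_eq (mi : Int) (P : List (Option (Int × String)))
    (hP : ∀ p ∈ P, (pieceB mi p = "" ↔ p = none)) :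
    P.reverse.foldl (buildStep mi) none =
      (if dropTrail (P.map (pieceB mi)) = [] then none
       else some (PySem.Str.join "\n" (dropTrail (P.map (pieceB mi))) ++ "\n")) := by
  rw [List.foldl_reverse]
  induction P with
  | nil => rfl
  | cons p P ih =>
    rw [List.foldr_cons, ih (fun q hq => hP q (by simp [hq])), List.map_cons, dropTrail]
    rcases hD : dropTrail (P.map (pieceB mi)) with _ | ⟨a, b⟩
    · rcases p with _ | pr
      · have h0 : pieceB mi none = "" := rfl
        simp [buildStep, h0]
      · have hne : pieceB mi (some pr) ≠ "" := fun hh => by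
          have h1 := (hP (some pr) (by simp)).1 hh
          exact Option.some_ne_none pr h1
        simp [buildStep, hne, join_singleton_str]
    · simp only [buildStep]
      have hj := join_cons_str (pieceB mi p) (a :: b) (by simp)
      simp [hj]
      apply String.ext
      simp

-- ===== final assembly lemma for A's collapse + trailing-newline branch (from A's side) =====
theorem collapse_nil : collapseTrailingA [] = [] := rfl

theorem collapse_single_empty : collapseTrailingA ([] ++ [""]) = [""] := by
  unfold collapseTrailingA
  rw [show (([] : List String) ++ [""]).length = 0 + 1 by simp, collapseGoA]
  simp

theorem collapse_concat_ne (xs : List String) (x : String) (h : x ≠ "") :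
    collapseTrailingA (xs ++ [x]) = xs ++ [x] := by
  unfold collapseTrailingA
  rw [show (xs ++ [x]).length = xs.length + 1 by simp, collapseGoA]
  rw [if_neg]
  intro hcond
  have := hcond.2.1
  rw [pyGet?_concat_neg_one] at this
  exact h (by simpa using this)

theorem collapse_concat2_empty (ys : List String) :
    collapseTrailingA (ys ++ [""] ++ [""]) = collapseTrailingA (ys ++ [""]) := by
  have h1 : PySem.List.pyGet? (ys ++ [""] ++ [""]) (-1) = some "" :=
    pyGet?_concat_neg_one (ys ++ [""]) ""
  have h2 : PySem.List.pyGet? (ys ++ [""] ++ [""]) (-2) = some "" := by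
    rw [List.append_assoc]; exact pyGet?_concat_neg_two ys "" ""
  unfold collapseTrailingA
  rw [show (ys ++ [""] ++ [""]).length = (ys ++ [""]).length + 1 by simp, collapseGoA,
    if_pos ⟨by simp, h1, h2⟩, List.dropLast_concat]

theorem collapse_concat2_ne (ys : List String) (y : String) (hy : y ≠ "") :
    collapseTrailingA (ys ++ [y] ++ [""]) = ys ++ [y] ++ [""] := by
  unfold collapseTrailingA
  rw [show (ys ++ [y] ++ [""]).length = (ys ++ [y]).length + 1 by simp, collapseGoA]
  rw [if_neg]
  intro hcond
  have h2 := hcond.2.2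
  have h3 : PySem.List.pyGet? (ys ++ [y, ""]) (-2) = some y := pyGet?_concat_neg_two ys y ""
  simp only [List.append_assoc, List.singleton_append] at h2 h3
  rw [h3] at h2
  exact hy (Option.some.inj h2)

theorem tail_eq (M : List String) :
    (if collapseTrailingA M ≠ [] ∧ PySem.List.pyGet? (collapseTrailingA M) (-1) = some "" then
        PySem.Str.join "\n" (collapseTrailingA M)
      else if collapseTrailingA M ≠ [] then PySem.Str.join "\n" (collapseTrailingA M) ++ "\n"
      else "")
    = if trimTrailingB M = [] then "" else PySem.Str.join "\n" (trimTrailingB M) ++ "\n" := by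
  induction M using List.reverseRecOn with
  | nil =>
    rw [collapse_nil, trim_nil]
    simp
  | append_singleton xs x ih =>
    by_cases hx : x = ""
    · subst hx
      rcases List.eq_nil_or_concat xs with rfl | ⟨ys, y, rfl⟩
      · rw [collapse_single_empty, trim_concat_empty, trim_nil]
        rw [if_pos ⟨(by simp : ([""] : List String) ≠ []), pyGet?_concat_neg_one [] ""⟩,
          join_singleton_str, if_pos rfl]
      · simp only [List.concat_eq_append] at ih ⊢
        by_cases hy : y = ""
        · subst hy
          rw [collapse_concat2_empty, trim_concat_empty]
          rw [trim_concat_empty] at ih ⊢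
          exact ih
        · rw [collapse_concat2_ne ys y hy, trim_concat_empty, trim_concat_ne ys y hy]
          have hne2 : ys ++ [y] ≠ [] := by simp
          rw [if_pos ⟨(by simp : ys ++ [y] ++ [""] ≠ []), pyGet?_concat_neg_one (ys ++ [y]) ""⟩]
          rw [if_neg hne2]
          exact join_concat_empty (ys ++ [y]) hne2
    · rw [collapse_concat_ne xs x hx, trim_concat_ne xs x hx]
      have hne : xs ++ [x] ≠ [] := by simp
      have hc : ¬ (xs ++ [x] ≠ [] ∧ PySem.List.pyGet? (xs ++ [x]) (-1) = some "") := by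
        intro hcond
        have h2 := hcond.2
        rw [pyGet?_concat_neg_one] at h2
        exact hx (Option.some.inj h2)
      rw [if_neg hc, if_pos hne, if_neg hne]

theorem getD_ite_none {c : Prop} [Decidable c] (x d : String) :
    (if c then none else some x).getD d = if c then d else x := by
  split <;> rfl

theorem filter_nonblank_ne (raw : List String) :
    ∀ r ∈ raw, ¬ PySem.Str.strip r = "" →
      leading_spaces_py r ∈ (raw.filter (fun rr => !(PySem.Str.strip rr == ""))).map leading_spaces_py := by
  intro r hr hnb
  exact List.mem_map_of_mem (List.mem_filter.2 ⟨hr, by simp [hnb]⟩)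

-- ===== VERDICT (by name: the statement is the Claim_ definition above) =====
theorem collect_multiline_py_spec : Claim_equal_collect_multiline_py := by
  intro lines si bi _dom _pre
  unfold Spec_collect_multiline_py
  simp only [collect_multiline_py, collect_multiline_py_alt]
  have hrel := loop_rel lines bi ((lines.length : Int) - (si + 1)).toNat (si + 1) []
  rw [show fMin ([] : List String) = none from rfl,
    show ([] : List String).map encodeLn = [] from rfl] at hrel
  rw [hrel]
  simp only []
  set raw := (collectLoopA lines bi ((lines.length : Int) - (si + 1)).toNat (si + 1) []).1 with hraw
  have hmi : (if (raw.filter (fun rr => !(PySem.Str.strip rr == ""))).isEmpty then (0:Int)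
      else (PySem.List.min? ((raw.filter (fun rr => !(PySem.Str.strip rr == ""))).map leading_spaces_py) (fun x => x)).getD 0)
      = (fMin raw).getD 0 := by
    by_cases hf : (raw.filter (fun rr => !(PySem.Str.strip rr == ""))).isEmpty
    · have hn : fMin raw = none := by
        unfold fMin
        rw [PySem.List.min?_eq_none_iff]
        simp [List.isEmpty_iff.1 hf]
      simp [hf, hn]
    · simp [hf, fMin]
  rw [hmi]
  set mi := (fMin raw).getD 0 with hmidef
  have hinv := loopA_inv lines bi ((lines.length : Int) - (si + 1)).toNat (si + 1) [] (by simp)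
  have hmile : ∀ r ∈ raw, ¬ PySem.Str.strip r = "" → 0 ≤ mi ∧ mi ≤ leading_spaces_py r := by
    intro r hr hnb
    have hmem := filter_nonblank_ne raw r hr hnb
    cases hf : fMin raw with
    | none =>
      exfalso
      unfold fMin at hf
      rw [PySem.List.min?_eq_none_iff] at hf
      rw [hf] at hmem
      simp at hmem
    | some m =>
      have hf' := hf
      unfold fMin at hf'
      have hle := PySem.List.min?_isMin hf' (leading_spaces_py r) hmem
      have hm := PySem.List.min?_mem hf'
      rcases List.mem_map.1 hm with ⟨r', _, hr'⟩
      have h0 : 0 ≤ m := hr' ▸ leading_nonneg r'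
      rw [hmidef, hf]
      exact ⟨h0, hle⟩
  -- piecewise equality of the two piece lists
  have hMeq : (raw.map encodeLn).map (pieceB mi) =
      raw.map (fun rr => if PySem.Str.strip rr = "" then "" else PySem.Str.slice rr (some mi) none) := by
    rw [List.map_map]
    apply List.map_congr_left
    intro r hr
    by_cases hb : PySem.Str.strip r = ""
    · simp [Function.comp, encodeLn, hb, pieceB]
    · rcases hmile r hr hb with ⟨h0, hle⟩
      have henc : encodeLn r
          = some (leading_spaces_py r, String.ofList (r.toList.dropWhile (fun c => c == ' '))) := by
        simp [encodeLn, hb]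
      show pieceB mi (encodeLn r) = _
      rw [henc, if_neg hb]
      rw [show pieceB mi (some (leading_spaces_py r, String.ofList (r.toList.dropWhile (fun c => c == ' '))))
          = String.ofList (List.replicate (leading_spaces_py r - mi).toNat ' ') ++
            String.ofList (r.toList.dropWhile (fun c => c == ' ')) from rfl]
      exact piece_eq_slice r mi h0 hle
  -- hypothesis of the fold lemma
  have hP : ∀ p ∈ raw.map encodeLn, (pieceB mi p = "" ↔ p = none) := by
    intro p hp
    rcases List.mem_map.1 hp with ⟨r, hr, rfl⟩
    by_cases hb : PySem.Str.strip r = ""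
    · simp [encodeLn, hb, pieceB]
    · have hne : r.toList.dropWhile (fun c => c == ' ') ≠ [] := by
        intro hh; exact hb (strip_of_dropWhile_nil r hh)
      have : (String.ofList (r.toList.dropWhile (fun c => c == ' '))) ≠ "" := by
        intro hh
        exact hne (by simpa using congrArg String.toList hh)
      have henc : encodeLn r
          = some (leading_spaces_py r, String.ofList (r.toList.dropWhile (fun c => c == ' '))) := by
        simp [encodeLn, hb]
      rw [henc]
      constructor
      · intro hh
        exact absurd hh (pieceB_ne_empty mi _ _ this)
      · intro hh; exact absurd hh (Option.some_ne_none _)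
  rw [foldB_eq mi (raw.map encodeLn) hP, hMeq, getD_ite_none]
  have hte := tail_eq (raw.map (fun rr => if PySem.Str.strip rr = "" then "" else PySem.Str.slice rr (some mi) none))
  rw [trim_eq_dropTrail] at hte
  rw [← hte]
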